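-- pv_equiv track=rewrite | github.com/josefigueredo/roland-sp404-mk2-converter | roland_converter/categorizer.py | _lookup_category
-- ===== SOURCE A (Python) =====
-- def _lookup_category(hint: str, category_map: dict[str, str], default: str) -> str:
--     """Look up a category hint in the map, trying exact then substring matches."""
--     if not hint:
--         return default
--
--     # Exact match
--     if hint in category_map:
--         return category_map[hint]
--
--     # Case-insensitive exact match
--     hint_lower = hint.lower()
--     for key, value in category_map.items():
--         if key.lower() == hint_lower:
--             return value
--
--     # Substring match (e.g. "Open Hi Hat" contains "Open")
--     for key, value in category_map.items():
--         if key.lower() in hint_lower: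
--             return value
--
--     return default
-- ===== SOURCE B (Python) =====
-- def _lookup_category(hint: str, category_map: dict[str, str], default: str) -> str:
--     """Single pass over the map collecting the first exact, case-insensitive
--     and substring candidates, then return them by tier priority."""
--     if not hint:
--         return default
--     hint_lower = hint.lower()
--     exact = ci = sub = None
--     for key, value in category_map.items():
--         if exact is None and key == hint:
--             exact = value
--         if ci is None and key.lower() == hint_lower:
--             ci = value
--         if sub is None and key.lower() in hint_lower:
--             sub = value
--     if exact is not None:
--         return exact
--     if ci is not None:
--         return ci
--     if sub is not None:
--         return sub
--     return default
-- ===== Notes on version B (the rewrite author's own statement) =====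
-- stated objective: alternative
-- what changed: Replaces A's three sequential scans (dict membership + two for-loops) with one pass over items() that records the first exact, case-insensitive and substring candidates, then picks by tier priority.
import Mathlib
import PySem

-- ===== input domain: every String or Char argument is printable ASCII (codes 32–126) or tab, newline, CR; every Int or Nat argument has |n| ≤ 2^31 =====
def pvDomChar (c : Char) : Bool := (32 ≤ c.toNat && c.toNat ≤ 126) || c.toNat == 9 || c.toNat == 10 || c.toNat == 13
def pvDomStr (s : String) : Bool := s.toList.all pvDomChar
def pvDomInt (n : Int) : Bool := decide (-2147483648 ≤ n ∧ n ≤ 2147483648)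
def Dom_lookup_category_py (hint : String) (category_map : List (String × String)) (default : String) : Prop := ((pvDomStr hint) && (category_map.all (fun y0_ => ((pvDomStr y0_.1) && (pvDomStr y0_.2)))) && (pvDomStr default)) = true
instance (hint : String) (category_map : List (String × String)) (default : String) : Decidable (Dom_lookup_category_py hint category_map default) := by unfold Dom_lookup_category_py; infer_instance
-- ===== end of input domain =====

-- B changes the decomposition only: one pass collecting three tier candidates instead of A's
-- three sequential scans; same cost, same results.

-- ===== PORT A =====
-- A: empty-hint guard, then dict membership/indexing, then two sequential for-loops
-- (a for-loop with an early return is ported as List.find? over the dict's items).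
def lookup_category_py (hint : String) (category_map : List (String × String)) (default : String) : String :=
  let d := PySem.Dict.ofList category_map
  if hint = "" then default
  else
    match d.get? hint with
    | some v => v
    | none =>
      let hint_lower := PySem.Str.lower hint
      match d.items.find? (fun p => PySem.Str.lower p.1 == hint_lower) with
      | some p => p.2
      | none =>
        match d.items.find? (fun p => PySem.Str.isIn (PySem.Str.lower p.1) hint_lower) with
        | some p => p.2
        | none => default

-- ===== PORT B =====
-- B: one fold over the dict's items carrying the three Optional candidates, then tier priority.
def lookup_category_py_alt (hint : String) (category_map : List (String × String)) (default : String) : String :=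
  if hint = "" then default
  else
    let hint_lower := PySem.Str.lower hint
    let r := (PySem.Dict.ofList category_map).items.foldl
      (fun (acc : Option String × Option String × Option String) p =>
        (if acc.1.isNone && (p.1 == hint) then some p.2 else acc.1,
         if acc.2.1.isNone && (PySem.Str.lower p.1 == hint_lower) then some p.2 else acc.2.1,
         if acc.2.2.isNone && PySem.Str.isIn (PySem.Str.lower p.1) hint_lower then some p.2 else acc.2.2))
      (none, none, none)
    match r.1 with
    | some v => v
    | none =>
      match r.2.1 with
      | some v => v
      | none =>
        match r.2.2 with
        | some v => v
        | none => default

-- ===== PRECONDITION & SPEC =====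
def Spec_lookup_category_py (hint : String) (category_map : List (String × String)) (default : String) (out : String) : Prop := out = lookup_category_py_alt hint category_map default
instance (hint : String) (category_map : List (String × String)) (default : String) (out : String) : Decidable (Spec_lookup_category_py hint category_map default out) := by unfold Spec_lookup_category_py; infer_instance

-- ===== CLAIM (what is proved, stated in full; the proofs are below) =====
def Claim_equal_lookup_category_py : Prop := ∀ (hint : String) (category_map : List (String × String)) (default : String), Dom_lookup_category_py hint category_map default → Spec_lookup_category_py hint category_map default (lookup_category_py hint category_map default)

-- ===== LEMMAS AND PROOFS =====

/-- A first-hit fold already holding a value keeps it. -/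
theorem foldl_first_some {α β : Type} (p : α → Bool) (f : α → β) (b : β) :
    ∀ (l : List α),
      l.foldl (fun acc x => if acc.isNone && p x then some (f x) else acc) (some b) = some b := by
  intro l
  induction l with
  | nil => rfl
  | cons x xs ih => simpa using ih

/-- A "first hit" fold over one Option accumulator is `List.find?`. -/
theorem foldl_first_eq_find? {α β : Type} (p : α → Bool) (f : α → β) :
    ∀ (l : List α),
      l.foldl (fun acc x => if acc.isNone && p x then some (f x) else acc) none
        = (l.find? p).map f := by
  intro l
  induction l with
  | nil => rfl
  | cons x xs ih =>
    by_cases h : p x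
    · rw [List.foldl_cons,
        show (if ((none : Option β).isNone && p x) = true then some (f x) else none) = some (f x)
          by simp [h],
        foldl_first_some p f (f x) xs]
      simp [h]
    · rw [List.foldl_cons,
        show (if ((none : Option β).isNone && p x) = true then some (f x) else none)
            = (none : Option β) by simp [h],
        ih]
      simp [h]

/-- The triple fold splits into three independent first-hit folds. -/
theorem foldl_triple_split {α β : Type} (p q r : α → Bool) (f : α → β) :
    ∀ (l : List α) (a b c : Option β),
      l.foldl (fun (acc : Option β × Option β × Option β) x =>
          (if acc.1.isNone && p x then some (f x) else acc.1,
           if acc.2.1.isNone && q x then some (f x) else acc.2.1,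
           if acc.2.2.isNone && r x then some (f x) else acc.2.2)) (a, b, c)
        = (l.foldl (fun acc x => if acc.isNone && p x then some (f x) else acc) a,
           l.foldl (fun acc x => if acc.isNone && q x then some (f x) else acc) b,
           l.foldl (fun acc x => if acc.isNone && r x then some (f x) else acc) c) := by
  intro l
  induction l with
  | nil => intro a b c; simp
  | cons x xs ih => intro a b c; simp only [List.foldl_cons]; exact ih _ _ _

-- ===== VERDICT (by name: the statement is the Claim_ definition above) =====
theorem lookup_category_py_spec : Claim_equal_lookup_category_py := by
  intro hint category_map default _
  unfold Spec_lookup_category_py lookup_category_py lookup_category_py_alt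
  by_cases hh : hint = ""
  · simp [hh]
  · simp only [hh, if_false]
    rw [foldl_triple_split (fun (p : String × String) => p.1 == hint)
        (fun (p : String × String) => PySem.Str.lower p.1 == PySem.Str.lower hint)
        (fun (p : String × String) => PySem.Str.isIn (PySem.Str.lower p.1) (PySem.Str.lower hint))
        (fun (p : String × String) => p.2)]
    simp only [foldl_first_eq_find?]
    show (match PySem.Dict.get? (PySem.Dict.ofList category_map) hint with
          | some v => v
          | none => _) = _
    rw [show PySem.Dict.get? (PySem.Dict.ofList category_map) hint
        = ((PySem.Dict.ofList category_map).items.find? (fun p => p.1 == hint)).map (·.2) from rfl]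
    cases he : (PySem.Dict.ofList category_map).items.find? (fun p => p.1 == hint) with
    | some pe => simp
    | none =>
      simp only [Option.map_none]
      cases hc : (PySem.Dict.ofList category_map).items.find?
          (fun p => PySem.Str.lower p.1 == PySem.Str.lower hint) with
      | some pc => simp
      | none =>
        simp only
        cases hs : (PySem.Dict.ofList category_map).items.find?
            (fun p => PySem.Str.isIn (PySem.Str.lower p.1) (PySem.Str.lower hint)) with
        | some ps => simp
        | none => simp
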